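-- pv_equiv track=rewrite | github.com/nehcgnay/fcsy | fcsy/fcs.py | cal_datapos
-- ===== SOURCE A (Python) =====
-- def cal_datapos(textend, datasize):
--     start = 0
--     end = 0
--     start_new = textend + 1
--     end_new = start_new + datasize - 1
--
--     while True:
--         inc_start = len(str(start_new)) - len(str(start))
--         inc_end = len(str(end_new)) - len(str(end))
--         start = start_new
--         end = end_new
--
--         if inc_start + inc_end > 0:
--             start_new = inc_start + inc_end + start
--             end_new = start_new + datasize - 1
--         else:
--             break
--
--     return start, end
-- ===== SOURCE B (Python) =====
-- def _width_nat(m):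
--     # number of decimal digits of a nonnegative integer
--     return 1 if m < 10 else 1 + _width_nat(m // 10)
--
-- def _width(n):
--     # number of characters of the decimal representation of n (sign included)
--     return 1 + _width_nat(-n) if n < 0 else _width_nat(n)
--
-- def cal_datapos(textend, datasize):
--     def settle(a, b):
--         # a, b: decimal widths assumed for start and end
--         start = textend + 1 + (a + b - 2)
--         end = start + datasize - 1
--         a2, b2 = _width(start), _width(end)
--         if a2 + b2 <= a + b:
--             return start, end
--         return settle(a2, b2)
--     return settle(1, 1)
-- ===== Notes on version B (the rewrite author's own statement) =====
-- stated objective: alternative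
-- what changed: B replaces A's four-variable loop that accumulates len(str(...)) deltas between successive start/end candidates with a recursion whose state is only the pair of assumed decimal widths, recomputing the positions from the widths each step and computing widths arithmetically by repeated division instead of string conversion.
import Mathlib
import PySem

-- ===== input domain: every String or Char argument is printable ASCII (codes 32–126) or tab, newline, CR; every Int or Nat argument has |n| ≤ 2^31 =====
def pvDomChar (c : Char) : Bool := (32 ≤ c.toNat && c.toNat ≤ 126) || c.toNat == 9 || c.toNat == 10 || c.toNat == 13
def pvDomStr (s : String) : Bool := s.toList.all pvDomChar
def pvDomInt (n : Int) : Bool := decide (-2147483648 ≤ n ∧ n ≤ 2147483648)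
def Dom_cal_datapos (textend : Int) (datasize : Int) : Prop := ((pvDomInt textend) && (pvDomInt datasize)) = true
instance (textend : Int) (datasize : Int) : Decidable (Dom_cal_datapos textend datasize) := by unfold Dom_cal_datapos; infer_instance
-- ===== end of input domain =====

-- B replaces A's four-variable loop accumulating len(str())-deltas by a recursion on the pair of
-- assumed decimal widths, recomputing positions from the widths and counting digits arithmetically.

-- ===== PORT A =====
-- len(str(n)) as an Int (exact: PySem.Int.toStr is Python's str on ints)
def pvDigLen (n : Int) : Int := PySem.Str.len (PySem.Int.toStr n)

-- A's `while True` loop; the fuel only makes the recursion total (the digit-count sum strictly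
-- increases while the loop continues, so 100 iterations are never exhausted on Dom-sized inputs).
def calDataposLoopA (datasize : Int) : Nat → Int → Int → Int → Int → Int × Int
  | 0, _, _, start_new, end_new => (start_new, end_new)
  | fuel + 1, start, end_, start_new, end_new =>
    let inc_start := pvDigLen start_new - pvDigLen start
    let inc_end := pvDigLen end_new - pvDigLen end_
    if inc_start + inc_end > 0 then
      calDataposLoopA datasize fuel start_new end_new (inc_start + inc_end + start_new)
        (inc_start + inc_end + start_new + datasize - 1)
    else
      (start_new, end_new)

def cal_datapos (textend : Int) (datasize : Int) : Int × Int :=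
  calDataposLoopA datasize 100 0 0 (textend + 1) (textend + 1 + datasize - 1)

-- ===== PORT B =====
-- Source B's _width_nat: decimal digit count of a nonnegative integer, by repeated division
def pvWidthNat (m : Nat) : Int :=
  if m < 10 then 1 else 1 + pvWidthNat (m / 10)
termination_by m
decreasing_by exact Nat.div_lt_self (by omega) (by omega)

-- Source B's _width: characters of the decimal representation, sign included
def pvWidth (n : Int) : Int :=
  if n < 0 then 1 + pvWidthNat (-n).toNat else pvWidthNat n.toNat

-- Source B's settle; same fuel remark as for A's loop
def calDataposLoopB (textend : Int) (datasize : Int) : Nat → Int → Int → Int × Int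
  | 0, a, b => (textend + 1 + (a + b - 2), textend + 1 + (a + b - 2) + datasize - 1)
  | fuel + 1, a, b =>
    let start := textend + 1 + (a + b - 2)
    let end_ := start + datasize - 1
    let a2 := pvWidth start
    let b2 := pvWidth end_
    if a2 + b2 ≤ a + b then (start, end_) else calDataposLoopB textend datasize fuel a2 b2

def cal_datapos_alt (textend : Int) (datasize : Int) : Int × Int :=
  calDataposLoopB textend datasize 100 1 1

-- ===== PRECONDITION & SPEC =====
def Spec_cal_datapos (textend : Int) (datasize : Int) (out : Int × Int) : Prop := out = cal_datapos_alt textend datasize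
instance (textend : Int) (datasize : Int) (out : Int × Int) : Decidable (Spec_cal_datapos textend datasize out) := by unfold Spec_cal_datapos; infer_instance

-- ===== CLAIM (what is proved, stated in full; the proofs are below) =====
def Claim_equal_cal_datapos : Prop := ∀ (textend : Int) (datasize : Int), Dom_cal_datapos textend datasize → Spec_cal_datapos textend datasize (cal_datapos textend datasize)

-- ===== LEMMAS AND PROOFS =====

-- exact length of Nat.toDigitsCore 10 on an empty accumulator, given enough fuel
theorem pv_toDigitsCore_len (fuel : Nat) :
    ∀ m : Nat, m < fuel → ((Nat.toDigitsCore 10 fuel m []).length : Int) = pvWidthNat m := by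
  induction fuel with
  | zero => intro m h; omega
  | succ f ih =>
    intro m hm
    rw [Nat.toDigitsCore]
    by_cases h : m / 10 = 0
    · simp only [h, if_true, List.length]
      rw [pvWidthNat]
      simp [Nat.div_eq_zero_iff] at h
      simp [h]
    · simp only [h, if_false]
      have h10 : 10 ≤ m := by
        rcases Nat.lt_or_ge m 10 with hlt | hge
        · exact absurd (Nat.div_eq_of_lt hlt) h
        · exact hge
      have hdiv : m / 10 < f := by
        have := Nat.div_lt_self (by omega : 0 < m) (by omega : 1 < 10)
        omega
      rw [Nat.toDigitsCore_lens_eq]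
      rw [pvWidthNat]
      simp only [if_neg (by omega : ¬ m < 10)]
      have := ih (m / 10) hdiv
      push_cast
      omega

theorem pv_toDigits_len (m : Nat) : ((Nat.toDigits 10 m).length : Int) = pvWidthNat m := by
  rw [Nat.toDigits]
  exact pv_toDigitsCore_len (m + 1) m (Nat.lt_succ_self m)

-- B's arithmetic width agrees with A's len(str(n)) on every integer
theorem pvWidth_eq_digLen (n : Int) : pvWidth n = pvDigLen n := by
  have h : pvDigLen n = ((PySem.Int.toChars n).length : Int) := by
    simp [pvDigLen, PySem.Str.len, PySem.Int.toList_toStr]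
  rw [h]
  unfold pvWidth PySem.Int.toChars
  by_cases hn : n < 0
  · simp only [if_pos hn, List.length_cons]
    have h2 : (-n).toNat = n.natAbs := by omega
    rw [h2, ← pv_toDigits_len n.natAbs]
    push_cast
    ring
  · simp only [if_neg hn]
    exact (pv_toDigits_len n.toNat).symm

-- Invariant: A's (start, end, start_new, end_new) correspond to B's width pair (a, b) by
-- a = digLen start, b = digLen end, start_new = textend+1+(a+b-2) (end_new follows).
theorem calDatapos_loop_eq (textend datasize : Int) :
    ∀ (fuel : Nat) (start end_ a b : Int),
      a = pvDigLen start → b = pvDigLen end_ →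
      calDataposLoopA datasize fuel start end_ (textend + 1 + (a + b - 2))
        (textend + 1 + (a + b - 2) + datasize - 1) =
      calDataposLoopB textend datasize fuel a b := by
  intro fuel
  induction fuel with
  | zero => intro start end_ a b ha hb; rfl
  | succ f ih =>
    intro start end_ a b ha hb
    simp only [calDataposLoopA, calDataposLoopB,
      pvWidth_eq_digLen (textend + 1 + (a + b - 2)),
      pvWidth_eq_digLen (textend + 1 + (a + b - 2) + datasize - 1), ← ha, ← hb]
    set a2 := pvDigLen (textend + 1 + (a + b - 2)) with ha2
    set b2 := pvDigLen (textend + 1 + (a + b - 2) + datasize - 1) with hb2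
    split_ifs with h1 h2 h2
    · exact absurd h2 (by omega)
    · have harg : a2 - a + (b2 - b) + (textend + 1 + (a + b - 2)) =
          textend + 1 + (a2 + b2 - 2) := by omega
      rw [harg]
      exact ih (textend + 1 + (a + b - 2)) (textend + 1 + (a + b - 2) + datasize - 1)
        a2 b2 ha2 hb2
    · rfl
    · exact absurd (by omega : a2 - a + (b2 - b) > 0) h1

-- ===== VERDICT (by name: the statement is the Claim_ definition above) =====
theorem cal_datapos_spec : Claim_equal_cal_datapos := by
  intro textend datasize _
  unfold Spec_cal_datapos cal_datapos cal_datapos_alt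
  have h0 : (1 : Int) = pvDigLen 0 := by decide
  have := calDatapos_loop_eq textend datasize 100 0 0 1 1 h0 h0
  rw [show textend + 1 + (1 + 1 - 2) = textend + 1 by ring] at this
  exact this
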